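-- pv_equiv track=rewrite | github.com/GEUS-Glaciology-and-Climate/pypromice-discharge | config/archive/make_config.py | format_cols
-- ===== SOURCE A (Python) =====
-- def format_cols(m, header):
--     col = '["time",'
--     count=1
--     for i in list(range(0,10))[7:]:
--         flag = False
--         for j in list(range(len(m)))[14:]:
--             if i == int(m[j]):
--                 idx = j
--                 flag = True
--         if flag==True:
--             name = header[idx].split('col_')[-1].lower()
--             col=col+'"' + name + '"' +','
--         # else:
--         #     col=col+f'"SKIP_{str(count)}",'
--
--         count=count+1
--
--     col=col[:-1]+']'
--     return col
-- ===== SOURCE B (Python) =====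
-- def format_cols(m, header):
--     # single reverse pass: first occurrence seen in reverse = last match; join-based assembly
--     name_of = {}
--     for j in reversed(range(14, len(m))):
--         v = int(m[j])
--         if 7 <= v <= 9 and v not in name_of:
--             name_of[v] = header[j].split('col_')[-1].lower()
--     names = ['time'] + [name_of[i] for i in (7, 8, 9) if i in name_of]
--     return '[' + ','.join('"' + n + '"' for n in names) + ']'
-- ===== Notes on version B (the rewrite author's own statement) =====
-- stated objective: alternative
-- what changed: B replaces A's per-target rescans of m[14:] (for each i in 7..9, scan all of m[14:] keeping the last matching index) with a single reverse pass over m[14:] that records, on first sight in reverse order (= last match), the already-formatted name for each target value, and assembles the result with ','.join over a names list instead of A's append-comma-then-trim-last-character.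
import Mathlib
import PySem

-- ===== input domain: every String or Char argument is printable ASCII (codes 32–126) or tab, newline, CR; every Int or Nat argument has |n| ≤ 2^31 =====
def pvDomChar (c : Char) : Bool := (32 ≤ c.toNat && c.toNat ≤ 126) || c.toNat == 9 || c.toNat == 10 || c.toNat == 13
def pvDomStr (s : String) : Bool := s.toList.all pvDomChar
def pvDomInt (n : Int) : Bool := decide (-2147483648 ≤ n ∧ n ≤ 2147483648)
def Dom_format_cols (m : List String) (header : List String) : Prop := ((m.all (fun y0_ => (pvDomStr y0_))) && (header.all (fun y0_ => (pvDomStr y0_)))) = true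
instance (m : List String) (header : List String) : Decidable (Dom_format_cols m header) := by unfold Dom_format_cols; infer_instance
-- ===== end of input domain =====

-- B replaces A's per-target rescans of m[14:] by ONE reverse pass (first hit in reverse = last match),
-- recording names only for targets 7..9, and assembles the result with ','.join instead of
-- append-comma-then-trim; return value only (no mutation). Objective: alternative decomposition.

-- ===== PORT A =====
-- shared transliterations of the Python sub-expressions int(m[j]) and header[j].split('col_')[-1].lower()
-- (total forms; Pre_ guarantees int() succeeds and the header index is in range)
def pvInt (m : List String) (j : Int) : Int :=
  (PySem.Int.ofStr? (PySem.List.pyGetD m j "")).getD 0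

def pvName (header : List String) (j : Int) : String :=
  PySem.Str.lower (PySem.List.pyGetD ((PySem.Str.split? (PySem.List.pyGetD header j "") "col_").getD []) (-1) "")

def format_cols (m : List String) (header : List String) : String :=
  let st := (PySem.List.slice (PySem.List.pyRange 0 10 1) (some 7) none).foldl
    (fun (st : String × Int × Int) (i : Int) =>
      let fi := (PySem.List.slice (PySem.List.pyRange 0 (m.length : Int) 1) (some 14) none).foldl
        (fun (fi : Bool × Int) (j : Int) => if i == pvInt m j then (true, j) else fi)
        (false, st.2.2)
      let col := if fi.1 then st.1 ++ "\"" ++ pvName header fi.2 ++ "\"" ++ "," else st.1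
      (col, st.2.1 + 1, fi.2))
    ("[\"time\",", 1, 0)
  PySem.Str.slice st.1 none (some (-1)) ++ "]"

-- ===== PORT B =====
-- one body of B's reverse loop: record name_of[v] = name(j) on the first (reverse-order) hit of v in 7..9
def pvStepB (m : List String) (header : List String) (d : PySem.Dict Int String) (j : Int) : PySem.Dict Int String :=
  if 7 ≤ pvInt m j ∧ pvInt m j ≤ 9 ∧ (d.get? (pvInt m j)).isNone = true
  then d.insert (pvInt m j) (pvName header j) else d

def format_cols_alt (m : List String) (header : List String) : String :=
  let name_of := ((PySem.List.pyRange 14 (m.length : Int) 1).reverse).foldl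
    (pvStepB m header) PySem.Dict.empty
  let names := "time" :: (([7, 8, 9] : List Int).filterMap (fun i => name_of.get? i))
  "[" ++ PySem.Str.join "," (names.map (fun n => "\"" ++ n ++ "\"")) ++ "]"

-- ===== PRECONDITION & SPEC =====
-- Pre_ = exactly where Python A returns: every m[j] with j ≥ 14 parses as an int (else ValueError),
-- and for each target value i in {7,8,9} the LAST index j ≥ 14 with int(m[j]) = i, if any, is a valid header index (else IndexError).
def Pre_format_cols (m : List String) (header : List String) : Prop :=
  (∀ j : Nat, j < m.length → 14 ≤ j → (PySem.Int.ofStr? (m.getD j "")).isSome = true) ∧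
  (∀ i ∈ ([7, 8, 9] : List Int), ∀ j : Nat, j < m.length → 14 ≤ j →
     PySem.Int.ofStr? (m.getD j "") = some i →
     (∀ j' : Nat, j' < m.length → j < j' → PySem.Int.ofStr? (m.getD j' "") ≠ some i) →
     j < header.length)
instance (m : List String) (header : List String) : Decidable (Pre_format_cols m header) := by
  unfold Pre_format_cols; infer_instance

def pvWitness_format_cols : List String × List String := ([], [])

def Spec_format_cols (m : List String) (header : List String) (out : String) : Prop := out = format_cols_alt m header
instance (m : List String) (header : List String) (out : String) : Decidable (Spec_format_cols m header out) := by unfold Spec_format_cols; infer_instance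

-- ===== CLAIM (what is proved, stated in full; the proofs are below) =====
def Claim_equal_format_cols : Prop := ∀ (m : List String) (header : List String), Dom_format_cols m header → Pre_format_cols m header → Spec_format_cols m header (format_cols m header)

-- ===== LEMMAS AND PROOFS =====

-- the index of the LAST j in the list with int(m[j]) = i (what A's inner rescan finds,
-- and what B's reverse pass records first)
def pvLast (m : List String) (i : Int) : List Int → Option Int
  | [] => none
  | j :: rest =>
    match pvLast m i rest with
    | some j' => some j'
    | none => if pvInt m j = i then some j else none

theorem lem_fA (m : List String) (i : Int) :
    ∀ (js : List Int) (fi : Bool × Int),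
      js.foldl (fun (fi : Bool × Int) (j : Int) => if i == pvInt m j then (true, j) else fi) fi
      = match pvLast m i js with
        | some j => (true, j)
        | none => fi := by
  intro js
  induction js with
  | nil => intro fi; rfl
  | cons j rest ih =>
    intro fi
    simp only [List.foldl, ih, pvLast]
    by_cases h : pvInt m j = i
    · have hb : (i == pvInt m j) = true := by simp [h]
      cases hr : pvLast m i rest <;> simp [hb, h]
    · have hb : (i == pvInt m j) = false := by rw [beq_eq_false_iff_ne]; exact fun e => h e.symm
      cases hr : pvLast m i rest <;> simp [hb, h]

theorem get?_pvStepB (m header : List String) (d : PySem.Dict Int String) (j i : Int) :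
    (pvStepB m header d j).get? i =
      if pvInt m j = i ∧ 7 ≤ i ∧ i ≤ 9 ∧ (d.get? i).isNone = true
      then some (pvName header j) else d.get? i := by
  unfold pvStepB
  by_cases hv : pvInt m j = i
  · subst hv
    by_cases h1 : 7 ≤ pvInt m j ∧ pvInt m j ≤ 9 ∧ ((d.get? (pvInt m j)).isNone = true)
    · rw [if_pos h1, if_pos ⟨rfl, h1⟩, PySem.Dict.get?_insert_self]
    · rw [if_neg h1, if_neg (by rintro ⟨_, h⟩; exact h1 h)]
  · have hR : (if pvInt m j = i ∧ 7 ≤ i ∧ i ≤ 9 ∧ (d.get? i).isNone = true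
        then some (pvName header j) else d.get? i) = d.get? i :=
      if_neg (by rintro ⟨h, _⟩; exact hv h)
    rw [hR]
    split_ifs with h1
    · exact PySem.Dict.get?_insert_of_ne _ _ (fun e => hv e.symm)
    · rfl

theorem lem_fB (m header : List String) :
    ∀ (js : List Int) (i : Int), 7 ≤ i → i ≤ 9 →
      (js.foldr (fun (j : Int) (d : PySem.Dict Int String) => pvStepB m header d j)
        PySem.Dict.empty).get? i
      = (pvLast m i js).map (pvName header) := by
  intro js
  induction js with
  | nil => intro i _ _; simp [pvLast, PySem.Dict.get?_empty]
  | cons j rest ih =>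
    intro i h7 h9
    have hiD := ih i h7 h9
    simp only [List.foldr, pvLast]
    rw [get?_pvStepB, hiD]
    by_cases hv : pvInt m j = i <;> cases hr : pvLast m i rest <;> simp [hr, hv, h7, h9]

theorem ranges_eq (n : Int) :
    PySem.List.slice (PySem.List.pyRange 0 n 1) (some 14) none = PySem.List.pyRange 14 n 1 := by
  rw [show (14 : Int) = ((14 : Nat) : Int) from rfl, PySem.List.slice_from_natCast]
  simp only [PySem.List.pyRange_one]
  apply List.ext_getElem
  · simp; omega
  · intro k h1 h2
    simp

theorem sliceDropComma (s : String) : PySem.Str.slice (s ++ ",") none (some (-1)) = s := by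
  apply String.toList_inj.mp
  rw [PySem.Str.slice_to_neg_one, String.toList_append]
  simp

theorem format_cols_eq (m header : List String) : format_cols m header = format_cols_alt m header := by
  show PySem.Str.slice _ none (some (-1)) ++ "]" = _
  unfold format_cols_alt
  rw [List.foldl_reverse]
  simp only [List.filterMap]
  rw [lem_fB m header _ 7 (by norm_num) (by norm_num),
      lem_fB m header _ 8 (by norm_num) (by norm_num),
      lem_fB m header _ 9 (by norm_num) (by norm_num)]
  rw [show PySem.List.slice (PySem.List.pyRange 0 10 1) (some 7) none = [7, 8, 9] from by decide,
      ranges_eq]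
  simp only [List.foldl]
  rw [lem_fA m 7, lem_fA m 8, lem_fA m 9]
  rcases h7 : pvLast m 7 (PySem.List.pyRange 14 (m.length : Int) 1) with _ | j7 <;>
    rcases h8 : pvLast m 8 (PySem.List.pyRange 14 (m.length : Int) 1) with _ | j8 <;>
    rcases h9 : pvLast m 9 (PySem.List.pyRange 14 (m.length : Int) 1) with _ | j9 <;>
    simp only [Option.map_some, Option.map_none, Bool.false_eq_true, if_true, if_false] <;>
  · rw [show ("[\"time\"," : String) = "[\"time\"" ++ "," from by decide, sliceDropComma]
    apply String.toList_inj.mp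
    simp [PySem.Str.join, PySem.Chars.join, String.toList_append, List.intercalate,
          List.intersperse]

-- ===== VERDICT (by name: the statement is the Claim_ definition above) =====
theorem format_cols_spec : Claim_equal_format_cols := by
  intro m header _ _
  show _ = _
  exact format_cols_eq m header
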